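-- pv_equiv track=rewrite | github.com/fhux192/fmusic-be | song_scatter.py | get_smart_group
-- ===== SOURCE A (Python) =====
-- def get_smart_group(tag_list):
--     if not tag_list: return 'Unknown'
--
--     original_tag = tag_list[0]
--     tag = original_tag.lower().strip()
--
--     if any(x in tag for x in
--            ['sad', 'cry', 'lonely', 'breakup', 'pain', 'regret', 'heartbreak', 'melancholic', 'grief']):
--         return 'Sad & Moody'
--
--     if any(x in tag for x in ['happy', 'fun', 'party', 'dance', 'upbeat', 'excited', 'energetic', 'joy']):
--         return 'Happy & Energy'
--
--     if any(x in tag for x in ['love', 'romantic', 'sweet', 'crush', 'lovestruck', 'date']):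
--         return 'Romantic'
--
--     if any(x in tag for x in ['chill', 'peace', 'dreamy', 'relax', 'sleep', 'calm']):
--         return 'Chill & Relax'
--
--     if any(x in tag for x in ['intense', 'dramatic', 'angry', 'dark', 'tension']):
--         return 'Intense & Drama'
--
--     return original_tag.title()
-- ===== SOURCE B (Python) =====
-- _LABELS = ('Sad & Moody', 'Happy & Energy', 'Romantic', 'Chill & Relax', 'Intense & Drama')
--
-- # One flat keyword -> group-priority-index map (keywords alphabetical); the winning
-- # group is simply the smallest index among all matched keywords, so no ordered
-- # group-by-group scan with early return is needed.
-- _KEYWORD_GROUP = {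
--     'angry': 4, 'breakup': 0, 'calm': 3, 'chill': 3, 'crush': 2, 'cry': 0,
--     'dance': 1, 'dark': 4, 'date': 2, 'dramatic': 4, 'dreamy': 3, 'energetic': 1,
--     'excited': 1, 'fun': 1, 'grief': 0, 'happy': 1, 'heartbreak': 0, 'intense': 4,
--     'joy': 1, 'lonely': 0, 'love': 2, 'lovestruck': 2, 'melancholic': 0, 'pain': 0,
--     'party': 1, 'peace': 3, 'regret': 0, 'relax': 3, 'romantic': 2, 'sad': 0,
--     'sleep': 3, 'sweet': 2, 'tension': 4, 'upbeat': 1,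
-- }
--
-- def get_smart_group(tag_list):
--     if not tag_list:
--         return 'Unknown'
--     tag = tag_list[0].lower().strip()
--     best = min((g for k, g in _KEYWORD_GROUP.items() if k in tag), default=None)
--     if best is None:
--         return tag_list[0].title()
--     return _LABELS[best]
-- ===== Notes on version B (the rewrite author's own statement) =====
-- stated objective: alternative
-- what changed: Replaced A's ordered five-branch early-return scan by one flat keyword->priority-index dict (iterated in alphabetical, not group, order) whose minimum matched index selects the group label, with the no-match case signalled by min's default.
import Mathlib
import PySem

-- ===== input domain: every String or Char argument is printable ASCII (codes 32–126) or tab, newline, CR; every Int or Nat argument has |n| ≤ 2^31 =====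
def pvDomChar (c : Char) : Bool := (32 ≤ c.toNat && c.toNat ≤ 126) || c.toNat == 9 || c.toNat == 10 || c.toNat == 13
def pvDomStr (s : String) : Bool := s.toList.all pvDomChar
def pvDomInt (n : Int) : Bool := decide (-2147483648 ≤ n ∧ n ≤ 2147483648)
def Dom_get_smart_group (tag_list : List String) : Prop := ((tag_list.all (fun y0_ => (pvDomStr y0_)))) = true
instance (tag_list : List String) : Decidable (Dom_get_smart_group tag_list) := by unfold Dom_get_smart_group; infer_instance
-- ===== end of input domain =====

-- B replaces A's ordered five-branch early-return scan by one flat keyword -> priority-index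
-- map (iterated in alphabetical, not group, order) whose MINIMUM matched index picks the group
-- (objective: alternative; same cost, order-independent single aggregation instead of a
-- priority if-chain).


-- shared helper: str.title(), exact on the ASCII domain (a letter after a non-letter is
-- uppercased, any other letter lowercased); both Pythons call the library str.title()
def pyTitleGo : Bool → List Char → List Char
  | _, [] => []
  | prevAlpha, c :: rest =>
    if PySem.Chars.isalpha c then
      (if prevAlpha then PySem.Chars.lowerChar c else PySem.Chars.upperChar c) :: pyTitleGo true rest
    else
      c :: pyTitleGo false rest

def pyTitle (s : String) : String := String.ofList (pyTitleGo false s.toList)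

-- ===== PORT A =====
def grpSad : List String := ["sad", "cry", "lonely", "breakup", "pain", "regret", "heartbreak", "melancholic", "grief"]
def grpHappy : List String := ["happy", "fun", "party", "dance", "upbeat", "excited", "energetic", "joy"]
def grpRomantic : List String := ["love", "romantic", "sweet", "crush", "lovestruck", "date"]
def grpChill : List String := ["chill", "peace", "dreamy", "relax", "sleep", "calm"]
def grpIntense : List String := ["intense", "dramatic", "angry", "dark", "tension"]

def get_smart_group (tag_list : List String) : String :=
  match tag_list with
  | [] => "Unknown"
  | original_tag :: _ =>
    let tag := PySem.Str.strip (PySem.Str.lower original_tag)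
    if grpSad.any (fun x => PySem.Str.isIn x tag) then "Sad & Moody"
    else if grpHappy.any (fun x => PySem.Str.isIn x tag) then "Happy & Energy"
    else if grpRomantic.any (fun x => PySem.Str.isIn x tag) then "Romantic"
    else if grpChill.any (fun x => PySem.Str.isIn x tag) then "Chill & Relax"
    else if grpIntense.any (fun x => PySem.Str.isIn x tag) then "Intense & Drama"
    else pyTitle original_tag

-- ===== PORT B =====
def pvLabels : List String :=
  ["Sad & Moody", "Happy & Energy", "Romantic", "Chill & Relax", "Intense & Drama"]

-- the flat keyword -> group-priority-index dict, in Source B's (alphabetical) insertion order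
def pvKeywordGroup : List (String × Int) :=
  [("angry", 4), ("breakup", 0), ("calm", 3), ("chill", 3), ("crush", 2), ("cry", 0),
   ("dance", 1), ("dark", 4), ("date", 2), ("dramatic", 4), ("dreamy", 3), ("energetic", 1),
   ("excited", 1), ("fun", 1), ("grief", 0), ("happy", 1), ("heartbreak", 0), ("intense", 4),
   ("joy", 1), ("lonely", 0), ("love", 2), ("lovestruck", 2), ("melancholic", 0), ("pain", 0),
   ("party", 1), ("peace", 3), ("regret", 0), ("relax", 3), ("romantic", 2), ("sad", 0),
   ("sleep", 3), ("sweet", 2), ("tension", 4), ("upbeat", 1)]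

def get_smart_group_alt (tag_list : List String) : String :=
  match tag_list with
  | [] => "Unknown"
  | t :: _ =>
    let tag := PySem.Str.strip (PySem.Str.lower t)
    -- best = min((g for k, g in _KEYWORD_GROUP.items() if k in tag), default=None)
    let matched := (pvKeywordGroup.filter (fun kg => PySem.Str.isIn kg.1 tag)).map (·.2)
    match PySem.List.min? matched (fun x => x) with
    | none => pyTitle t
    | some g => (PySem.List.pyGet? pvLabels g).getD ""   -- g ∈ {0..4}, always in range

-- ===== PRECONDITION & SPEC =====
def Spec_get_smart_group (tag_list : List String) (out : String) : Prop := out = get_smart_group_alt tag_list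
instance (tag_list : List String) (out : String) : Decidable (Spec_get_smart_group tag_list out) := by unfold Spec_get_smart_group; infer_instance

-- ===== CLAIM (what is proved, stated in full; the proofs are below) =====
def Claim_equal_get_smart_group : Prop := ∀ (tag_list : List String), Dom_get_smart_group tag_list → Spec_get_smart_group tag_list (get_smart_group tag_list)

-- ===== LEMMAS AND PROOFS =====

-- every (keyword, index) pair of B's flat dict belongs to the A-group its index names
lemma pvKG_groups : ∀ kg ∈ pvKeywordGroup,
    (kg.2 = 0 ∧ kg.1 ∈ grpSad) ∨ (kg.2 = 1 ∧ kg.1 ∈ grpHappy) ∨ (kg.2 = 2 ∧ kg.1 ∈ grpRomantic) ∨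
    (kg.2 = 3 ∧ kg.1 ∈ grpChill) ∨ (kg.2 = 4 ∧ kg.1 ∈ grpIntense) := by
  decide

-- and conversely every keyword of an A-group is in the flat dict with that index
lemma grpSad_mem : ∀ k ∈ grpSad, (k, (0 : Int)) ∈ pvKeywordGroup := by decide
lemma grpHappy_mem : ∀ k ∈ grpHappy, (k, (1 : Int)) ∈ pvKeywordGroup := by decide
lemma grpRomantic_mem : ∀ k ∈ grpRomantic, (k, (2 : Int)) ∈ pvKeywordGroup := by decide
lemma grpChill_mem : ∀ k ∈ grpChill, (k, (3 : Int)) ∈ pvKeywordGroup := by decide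
lemma grpIntense_mem : ∀ k ∈ grpIntense, (k, (4 : Int)) ∈ pvKeywordGroup := by decide

-- membership in B's matched-index list
lemma mem_matched (tag : String) (g : Int) :
    g ∈ (pvKeywordGroup.filter (fun kg => PySem.Str.isIn kg.1 tag)).map (·.2) ↔
      ∃ kg ∈ pvKeywordGroup, PySem.Str.isIn kg.1 tag = true ∧ kg.2 = g := by
  simp [List.mem_map, List.mem_filter]

-- min? of a list containing i and bounded below by i is some i
lemma min?_eq_of_mem_of_lb (xs : List Int) (i : Int) (h1 : i ∈ xs)
    (h2 : ∀ y ∈ xs, i ≤ y) : PySem.List.min? xs (fun x => x) = some i := by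
  cases hm : PySem.List.min? xs (fun x => x) with
  | none =>
    rw [PySem.List.min?_eq_none_iff] at hm
    simp [hm] at h1
  | some m =>
    have hmem := PySem.List.min?_mem hm
    have hmin := PySem.List.min?_isMin hm i h1
    have := h2 m hmem
    simp only [Option.some.injEq]
    omega

-- a matched index names a group with a true match
lemma matched_cases (tag : String) (g : Int)
    (h : g ∈ (pvKeywordGroup.filter (fun kg => PySem.Str.isIn kg.1 tag)).map (·.2)) :
    (g = 0 ∧ grpSad.any (fun x => PySem.Str.isIn x tag)) ∨
    (g = 1 ∧ grpHappy.any (fun x => PySem.Str.isIn x tag)) ∨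
    (g = 2 ∧ grpRomantic.any (fun x => PySem.Str.isIn x tag)) ∨
    (g = 3 ∧ grpChill.any (fun x => PySem.Str.isIn x tag)) ∨
    (g = 4 ∧ grpIntense.any (fun x => PySem.Str.isIn x tag)) := by
  rcases (mem_matched tag g).mp h with ⟨kg, hkg, hin, rfl⟩
  rcases pvKG_groups kg hkg with ⟨h0, hk⟩ | ⟨h0, hk⟩ | ⟨h0, hk⟩ | ⟨h0, hk⟩ | ⟨h0, hk⟩
  · exact Or.inl ⟨h0, List.any_eq_true.mpr ⟨kg.1, hk, hin⟩⟩
  · exact Or.inr (Or.inl ⟨h0, List.any_eq_true.mpr ⟨kg.1, hk, hin⟩⟩)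
  · exact Or.inr (Or.inr (Or.inl ⟨h0, List.any_eq_true.mpr ⟨kg.1, hk, hin⟩⟩))
  · exact Or.inr (Or.inr (Or.inr (Or.inl ⟨h0, List.any_eq_true.mpr ⟨kg.1, hk, hin⟩⟩)))
  · exact Or.inr (Or.inr (Or.inr (Or.inr ⟨h0, List.any_eq_true.mpr ⟨kg.1, hk, hin⟩⟩)))

-- a true group puts its index into matched
lemma group_matched (tag : String) (g : Int) (grp : List String)
    (hb : ∀ k ∈ grp, (k, g) ∈ pvKeywordGroup)
    (h : grp.any (fun x => PySem.Str.isIn x tag) = true) :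
    g ∈ (pvKeywordGroup.filter (fun kg => PySem.Str.isIn kg.1 tag)).map (·.2) := by
  rcases List.any_eq_true.mp h with ⟨k, hk, hin⟩
  exact (mem_matched tag g).mpr ⟨(k, g), hb k hk, hin, rfl⟩

-- ===== VERDICT (by name: the statement is the Claim_ definition above) =====
theorem get_smart_group_spec : Claim_equal_get_smart_group := by
  intro tag_list _
  unfold Spec_get_smart_group
  cases tag_list with
  | nil => rfl
  | cons t rest =>
    unfold get_smart_group get_smart_group_alt
    dsimp only
    set tag := PySem.Str.strip (PySem.Str.lower t) with htag
    set matched := (pvKeywordGroup.filter (fun kg => PySem.Str.isIn kg.1 tag)).map (·.2) with hmatched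
    by_cases h0 : grpSad.any (fun x => PySem.Str.isIn x tag) = true
    · have hmin : PySem.List.min? matched (fun x => x) = some 0 := by
        refine min?_eq_of_mem_of_lb _ _ (group_matched tag 0 grpSad grpSad_mem h0) ?_
        intro y hy
        rcases matched_cases tag y hy with ⟨rfl, _⟩ | ⟨rfl, _⟩ | ⟨rfl, _⟩ | ⟨rfl, _⟩ | ⟨rfl, _⟩ <;> omega
      rw [if_pos h0, hmin]; rfl
    · by_cases h1 : grpHappy.any (fun x => PySem.Str.isIn x tag) = true
      · have hmin : PySem.List.min? matched (fun x => x) = some 1 := by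
          refine min?_eq_of_mem_of_lb _ _ (group_matched tag 1 grpHappy grpHappy_mem h1) ?_
          intro y hy
          rcases matched_cases tag y hy with ⟨rfl, hb⟩ | ⟨rfl, _⟩ | ⟨rfl, _⟩ | ⟨rfl, _⟩ | ⟨rfl, _⟩
          · exact absurd hb h0
          all_goals omega
        rw [if_neg h0, if_pos h1, hmin]; rfl
      · by_cases h2 : grpRomantic.any (fun x => PySem.Str.isIn x tag) = true
        · have hmin : PySem.List.min? matched (fun x => x) = some 2 := by
            refine min?_eq_of_mem_of_lb _ _ (group_matched tag 2 grpRomantic grpRomantic_mem h2) ?_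
            intro y hy
            rcases matched_cases tag y hy with ⟨rfl, hb⟩ | ⟨rfl, hb⟩ | ⟨rfl, _⟩ | ⟨rfl, _⟩ | ⟨rfl, _⟩
            · exact absurd hb h0
            · exact absurd hb h1
            all_goals omega
          rw [if_neg h0, if_neg h1, if_pos h2, hmin]; rfl
        · by_cases h3 : grpChill.any (fun x => PySem.Str.isIn x tag) = true
          · have hmin : PySem.List.min? matched (fun x => x) = some 3 := by
              refine min?_eq_of_mem_of_lb _ _ (group_matched tag 3 grpChill grpChill_mem h3) ?_
              intro y hy
              rcases matched_cases tag y hy with ⟨rfl, hb⟩ | ⟨rfl, hb⟩ | ⟨rfl, hb⟩ | ⟨rfl, _⟩ | ⟨rfl, _⟩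
              · exact absurd hb h0
              · exact absurd hb h1
              · exact absurd hb h2
              all_goals omega
            rw [if_neg h0, if_neg h1, if_neg h2, if_pos h3, hmin]; rfl
          · by_cases h4 : grpIntense.any (fun x => PySem.Str.isIn x tag) = true
            · have hmin : PySem.List.min? matched (fun x => x) = some 4 := by
                refine min?_eq_of_mem_of_lb _ _ (group_matched tag 4 grpIntense grpIntense_mem h4) ?_
                intro y hy
                rcases matched_cases tag y hy with ⟨rfl, hb⟩ | ⟨rfl, hb⟩ | ⟨rfl, hb⟩ | ⟨rfl, hb⟩ | ⟨rfl, _⟩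
                · exact absurd hb h0
                · exact absurd hb h1
                · exact absurd hb h2
                · exact absurd hb h3
                all_goals omega
              rw [if_neg h0, if_neg h1, if_neg h2, if_neg h3, if_pos h4, hmin]; rfl
            · have hmin : PySem.List.min? matched (fun x => x) = none := by
                rw [PySem.List.min?_eq_none_iff, hmatched, List.map_eq_nil_iff, List.filter_eq_nil_iff]
                intro kg hkg
                simp only [Bool.not_eq_true, List.any_eq_false] at h0 h1 h2 h3 h4
                rcases pvKG_groups kg hkg with ⟨_, hk⟩ | ⟨_, hk⟩ | ⟨_, hk⟩ | ⟨_, hk⟩ | ⟨_, hk⟩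
                · simpa using h0 kg.1 hk
                · simpa using h1 kg.1 hk
                · simpa using h2 kg.1 hk
                · simpa using h3 kg.1 hk
                · simpa using h4 kg.1 hk
              rw [if_neg h0, if_neg h1, if_neg h2, if_neg h3, if_neg h4, hmin]
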